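-- pv_equiv track=rewrite | github.com/HolyJack/StaticCodeAnalyzer | code_analyzer.py | style_error_005
-- ===== SOURCE A (Python) =====
-- def find_comment_pos(line):
--     quote, ignore, skip = None, False, False
--
--     for i, c in enumerate(line):
--         if skip:
--             skip = False
--             continue
--
--         if c == '\\':
--             skip = True
--             continue
--
--         if not ignore and (c == '"' or c == "'"):
--             quote, ignore = c, True
--         elif not ignore and c == '#':
--             return i
--         elif ignore and c == quote:
--             quote, ignore = None, False
--
--     return -1
--
-- def style_error_005(line):
--     pos = find_comment_pos(line)
--
--     if pos != -1:
--         line = line[pos+1:]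
--         words = line.lower().split(' ')
--
--         for word in words:
--             if word == 'todo':
--                 return True
--     return False
-- ===== SOURCE B (Python) =====
-- def style_error_005(line):
--     quote = None
--     skip = False
--     i = 0
--     n = len(line)
--     while i < n:  # code mode: same quote/escape state machine, fused with the word scan
--         c = line[i]
--         if skip:
--             skip = False
--         elif c == '\\':
--             skip = True
--         elif quote is None:
--             if c == '"' or c == "'":
--                 quote = c
--             elif c == '#':
--                 buf = ''  # comment mode: stream the words, no slice/split pass
--                 for ch in line[i + 1:]:
--                     ch = ch.lower()
--                     if ch == ' ':
--                         if buf == 'todo':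
--                             return True
--                         buf = ''
--                     else:
--                         buf += ch
--                 return buf == 'todo'
--         elif c == quote:
--             quote = None
--         i += 1
--     return False
-- ===== Notes on version B (the rewrite author's own statement) =====
-- stated objective: alternative
-- what changed: B fuses A's locate-then-slice-lower-split-scan pipeline into one streaming pass: the same quote/escape scan until the unquoted comment marker, then a word-accumulator scan over the rest that lowercases each char and tests the buffer against the target word at each single-space boundary and at end of line, returning on the first match without ever building the sliced string or the word list.
import Mathlib
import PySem

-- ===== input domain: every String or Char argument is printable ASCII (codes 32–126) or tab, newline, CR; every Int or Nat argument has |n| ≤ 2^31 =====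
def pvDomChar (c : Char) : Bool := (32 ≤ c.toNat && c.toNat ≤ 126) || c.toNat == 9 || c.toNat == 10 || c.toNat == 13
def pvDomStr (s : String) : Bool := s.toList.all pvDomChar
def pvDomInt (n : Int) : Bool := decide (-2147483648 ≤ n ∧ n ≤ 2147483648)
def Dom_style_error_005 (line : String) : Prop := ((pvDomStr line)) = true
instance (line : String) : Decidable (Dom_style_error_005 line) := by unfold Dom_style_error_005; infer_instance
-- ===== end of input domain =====

-- B replaces A's two sequential passes (find comment position, then slice/lower/split and scan
-- the word list) by a single streaming scan with a word buffer; same return value everywhere.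

-- ===== PORT A =====
-- find_comment_pos's loop over enumerate(line): (quote, ignore, skip) state, counter i
def findLoopA : List Char → Nat → Option Char → Bool → Bool → Int
  | [], _, _, _, _ => -1
  | c :: rest, i, quote, ignore, skip =>
    if skip then findLoopA rest (i+1) quote ignore false
    else if c = '\\' then findLoopA rest (i+1) quote ignore true
    else if ignore = false ∧ (c = '"' ∨ c = '\'') then findLoopA rest (i+1) (some c) true skip
    else if ignore = false ∧ c = '#' then (i : Int)
    else if ignore = true ∧ some c = quote then findLoopA rest (i+1) none false skip
    else findLoopA rest (i+1) quote ignore skip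

-- the 'for word in words: if word == 'todo': return True' loop
def wordsLoopA : List (List Char) → Bool
  | [] => false
  | w :: ws => if w = ['t','o','d','o'] then true else wordsLoopA ws

def style_error_005 (line : String) : Bool :=
  let pos := findLoopA line.toList 0 none false false
  if pos ≠ -1 then
    wordsLoopA (PySem.Chars.splitOn
      (PySem.Chars.lower (PySem.List.slice line.toList (some (pos + 1)) none)) [' '])
  else false

-- ===== PORT B =====
-- comment mode: lowercase each char, accumulate a word buffer, test it at each ' ' and at the end
def wordScanB (buf : List Char) : List Char → Bool
  | [] => decide (buf = ['t','o','d','o'])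
  | c :: rest =>
    let d := PySem.Chars.lowerChar c
    if d = ' ' then (if buf = ['t','o','d','o'] then true else wordScanB [] rest)
    else wordScanB (buf ++ [d]) rest

-- code mode: quote/escape state machine until an unquoted unescaped '#'
def codeScanB : List Char → Option Char → Bool → Bool
  | [], _, _ => false
  | c :: rest, quote, skip =>
    if skip then codeScanB rest quote false
    else if c = '\\' then codeScanB rest quote true
    else match quote with
      | none =>
        if c = '"' ∨ c = '\'' then codeScanB rest (some c) false
        else if c = '#' then wordScanB [] rest
        else codeScanB rest none false
      | some qc => if c = qc then codeScanB rest none false else codeScanB rest (some qc) false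

def style_error_005_alt (line : String) : Bool := codeScanB line.toList none false

-- ===== PRECONDITION & SPEC =====
def Spec_style_error_005 (line : String) (out : Bool) : Prop := out = style_error_005_alt line
instance (line : String) (out : Bool) : Decidable (Spec_style_error_005 line out) := by unfold Spec_style_error_005; infer_instance

-- ===== CLAIM (what is proved, stated in full; the proofs are below) =====
def Claim_equal_style_error_005 : Prop := ∀ (line : String), Dom_style_error_005 line → Spec_style_error_005 line (style_error_005 line)

-- ===== LEMMAS AND PROOFS =====

-- reference splitter for sep = [' '] (cur is the current piece, reversed)
def mySplit (cur : List Char) : List Char → List (List Char)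
  | [] => [cur.reverse]
  | c :: r => if c = ' ' then cur.reverse :: mySplit [] r else mySplit (c :: cur) r

theorem go_spec (cs : List Char) : ∀ (fuel : Nat) (cur : List Char) (acc : List (List Char)),
    cs.length < fuel →
    PySem.Chars.splitOn.go [' '] fuel cs cur acc = acc.reverse ++ mySplit cur cs := by
  induction cs with
  | nil =>
    intro fuel cur acc h
    match fuel, h with
    | fuel+1, _ => simp [PySem.Chars.splitOn.go, mySplit]
  | cons c rest ih =>
    intro fuel cur acc h
    match fuel, h with
    | fuel+1, h =>
      have hr : rest.length < fuel := by simpa using Nat.lt_of_succ_lt_succ h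
      by_cases hc : c = ' '
      · subst hc
        simp only [PySem.Chars.splitOn.go, List.isPrefixOf, List.isPrefixOf_nil_left,
          Bool.and_true, BEq.rfl, if_true, List.length_cons, List.length_nil, Nat.zero_add,
          List.drop_succ_cons, List.drop_zero, mySplit, if_pos rfl]
        rw [ih fuel [] (cur.reverse :: acc) hr]
        simp
      · have hbc : (' ' == c) = false := by
          rw [beq_eq_false_iff_ne]
          exact fun e => hc e.symm
        simp only [PySem.Chars.splitOn.go, List.isPrefixOf, List.isPrefixOf_nil_left,
          Bool.and_true, hbc, Bool.false_eq_true, if_false, mySplit, if_neg hc]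
        exact ih fuel (c :: cur) acc hr

theorem splitOn_space (cs : List Char) :
    PySem.Chars.splitOn cs [' '] = mySplit [] cs := by
  have := go_spec cs (cs.length + 1) [] [] (Nat.lt_succ_self _)
  simpa [PySem.Chars.splitOn] using this

theorem wordScan_spec (cs : List Char) : ∀ (buf : List Char),
    wordScanB buf cs = wordsLoopA (mySplit buf.reverse (PySem.Chars.lower cs)) := by
  induction cs with
  | nil => intro buf; simp [wordScanB, PySem.Chars.lower, mySplit, wordsLoopA]
  | cons c rest ih =>
    intro buf
    simp only [wordScanB, PySem.Chars.lower, List.map_cons, mySplit]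
    by_cases hd : PySem.Chars.lowerChar c = ' '
    · simp only [hd, if_pos rfl, wordsLoopA, List.reverse_reverse]
      by_cases hb : buf = ['t','o','d','o'] <;> simp [hb, ih [], PySem.Chars.lower, wordsLoopA]
    · simp only [if_neg hd, ih (buf ++ [PySem.Chars.lowerChar c]), List.reverse_append,
        List.reverse_singleton, List.singleton_append, PySem.Chars.lower, mySplit, if_neg hd]

theorem bridge (cs : List Char) : ∀ (i : Nat) (q : Option Char) (s : Bool) (full : List Char),
    full.drop i = cs →
    codeScanB cs q s =
      (if findLoopA cs i q q.isSome s ≠ -1 then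
        wordsLoopA (PySem.Chars.splitOn
          (PySem.Chars.lower (PySem.List.slice full (some (findLoopA cs i q q.isSome s + 1)) none)) [' '])
      else false) := by
  induction cs with
  | nil => intro i q s full h; simp [codeScanB, findLoopA]
  | cons c rest ih =>
    intro i q s full h
    have hrest : full.drop (i+1) = rest := by
      rw [← List.tail_drop, h]; rfl
    by_cases hs : s = true
    · subst hs
      simp only [codeScanB, findLoopA, if_pos rfl]
      exact ih (i+1) q false full hrest
    · replace hs : s = false := by revert hs; cases s <;> simp
      subst hs
      simp only [codeScanB, findLoopA, Bool.false_eq_true, if_false]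
      by_cases hbs : c = '\\'
      · simp only [if_pos hbs]
        exact ih (i+1) q true full hrest
      · simp only [if_neg hbs]
        cases q with
        | none =>
          by_cases hq : c = '"' ∨ c = '\''
          · simp only [Option.isSome_none, Bool.false_eq_true, false_and, true_and,
              if_pos hq, if_false]
            simpa using ih (i+1) (some c) false full hrest
          · by_cases hh : c = '#'
            · simp only [Option.isSome_none, true_and, if_neg hq, if_pos hh]
              have hne : (i : Int) ≠ -1 := by omega
              rw [if_pos hne]
              have hsl : PySem.List.slice full (some ((i : Int) + 1)) none = rest := by
                have hcast : ((i : Int) + 1) = ((i + 1 : Nat) : Int) := by push_cast; ring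
                rw [hcast, PySem.List.slice_from_natCast, hrest]
              rw [hsl, splitOn_space]
              simpa using wordScan_spec rest []
            · simp only [Option.isSome_none, true_and, false_and, if_neg hq, if_neg hh]
              simpa using ih (i+1) none false full hrest
        | some qc =>
          by_cases hcq : c = qc
          · subst hcq
            simp only [Option.isSome_some, Bool.true_eq_false, false_and, true_and,
              if_pos rfl]
            simpa using ih (i+1) none false full hrest
          · have h3 : ¬ (some c = some qc) := by simp [hcq]
            simp only [Option.isSome_some, Bool.true_eq_false, false_and, true_and,
              if_neg hcq, if_neg h3]
            simpa using ih (i+1) (some qc) false full hrest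

-- ===== VERDICT (by name: the statement is the Claim_ definition above) =====
theorem style_error_005_spec : Claim_equal_style_error_005 := by
  intro line _
  unfold Spec_style_error_005 style_error_005 style_error_005_alt
  exact (bridge line.toList 0 none false line.toList (by simp)).symm
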